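-- pv_equiv track=rewrite | github.com/geezee/mail-lang | util.py | is_string
-- ===== SOURCE A (Python) =====
-- def is_string(x):
--     if len(x) < 2: return False
--     if not x[0] == '"' or not x[-1] == '"': return False
--     esc = False
--     for c in x[1:-1]:
--         if not esc and (c == '"'): return False
--         esc = not esc and (c == '\\')
--     return not esc
-- ===== SOURCE B (Python) =====
-- def is_string(x):
--     if len(x) < 2 or x[0] != '"' or x[-1] != '"':
--         return False
--     i, end = 1, len(x) - 1
--     while i < end:
--         if x[i] == '\\':
--             i += 2          # skip the escaped character
--         elif x[i] == '"':
--             return False    # bare quote inside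
--         else:
--             i += 1
--     return i == end         # a trailing backslash overshoots past the closing quote
-- ===== Notes on version B (the rewrite author's own statement) =====
-- stated objective: alternative
-- what changed: Replaces the per-character escape-parity flag with an index-skipping while loop that jumps 2 past a backslash and requires the scan to land exactly on the closing quote.
import Mathlib
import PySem

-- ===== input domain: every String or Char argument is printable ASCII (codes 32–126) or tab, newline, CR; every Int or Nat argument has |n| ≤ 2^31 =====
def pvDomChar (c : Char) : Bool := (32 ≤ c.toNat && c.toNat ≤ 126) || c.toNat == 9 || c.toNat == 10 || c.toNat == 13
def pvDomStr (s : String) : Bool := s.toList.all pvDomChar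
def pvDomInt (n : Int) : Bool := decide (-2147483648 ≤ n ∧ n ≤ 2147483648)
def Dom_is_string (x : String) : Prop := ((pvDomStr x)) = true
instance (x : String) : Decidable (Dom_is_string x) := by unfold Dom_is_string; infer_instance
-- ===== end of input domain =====

-- B replaces A's escape-parity flag by an index-skipping scan (jump 2 past a backslash,
-- land exactly on the closing quote); same values everywhere, no speed claim.

-- ===== PORT A =====
-- the 'for c in x[1:-1]' loop with its early return and the esc flag
def isStringLoopA : List Char → Bool → Bool
  | [], esc => !esc
  | c :: rest, esc =>
    if !esc && c == '"' then false
    else isStringLoopA rest (!esc && c == '\\')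

def is_string (x : String) : Bool :=
  let l := x.toList
  if l.length < 2 then false
  -- x[0] and x[-1]: indices are in range here (length ≥ 2), so plain getD is exact
  else if !(l.getD 0 ' ' == '"') || !(l.getD (l.length - 1) ' ' == '"') then false
  else isStringLoopA (PySem.List.slice l (some 1) (some (-1))) false

-- ===== PORT B =====
-- the while loop: i jumps by 2 over a backslash, 1 otherwise; bare quote aborts
def isStringLoopB (l : List Char) (stop : Nat) (i : Nat) : Bool :=
  if i < stop then
    -- x[i]: i < stop ≤ len x - 1, always in range, so plain getD is exact
    if l.getD i ' ' == '\\' then isStringLoopB l stop (i + 2)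
    else if l.getD i ' ' == '"' then false
    else isStringLoopB l stop (i + 1)
  else i == stop
termination_by stop - i

def is_string_alt (x : String) : Bool :=
  let l := x.toList
  if l.length < 2 || !(l.getD 0 ' ' == '"') || !(l.getD (l.length - 1) ' ' == '"') then false
  else isStringLoopB l (l.length - 1) 1

-- ===== PRECONDITION & SPEC =====
def Spec_is_string (x : String) (out : Bool) : Prop := out = is_string_alt x
instance (x : String) (out : Bool) : Decidable (Spec_is_string x out) := by unfold Spec_is_string; infer_instance

-- ===== CLAIM (what is proved, stated in full; the proofs are below) =====
def Claim_equal_is_string : Prop := ∀ (x : String), Dom_is_string x → Spec_is_string x (is_string x)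

-- ===== LEMMAS AND PROOFS =====

-- the index-skipping scan computes A's escape-parity scan on the remaining segment
lemma loopB_eq_loopA (l : List Char) (stop : Nat) (hstop : stop ≤ l.length) :
    ∀ n i, n = stop - i → i ≤ stop →
      isStringLoopB l stop i = isStringLoopA ((l.take stop).drop i) false := by
  intro n
  induction n using Nat.strong_induction_on with
  | _ n ih =>
    intro i hn hi
    rcases Nat.lt_or_ge i stop with hlt | hge
    · have hilen : i < l.length := lt_of_lt_of_le hlt hstop
      have hseg : (l.take stop).drop i = l[i] :: (l.take stop).drop (i + 1) := by
        rw [List.drop_eq_getElem_cons (by simpa [Nat.lt_min] using ⟨hlt, hilen⟩)]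
        simp [List.getElem_take]
      have hget : l.getD i ' ' = l[i] := List.getD_eq_getElem l ' ' hilen
      rw [isStringLoopB, if_pos hlt, hget, hseg]
      by_cases hbs : l[i] = '\\'
      · simp only [hbs, beq_self_eq_true, if_pos]
        rcases Nat.lt_or_ge (i + 1) stop with h1 | h1
        · -- a character follows the backslash inside the segment
          have h1len : i + 1 < l.length := lt_of_lt_of_le h1 hstop
          have hseg2 : (l.take stop).drop (i + 1) = l[i+1] :: (l.take stop).drop (i + 2) := by
            rw [List.drop_eq_getElem_cons (by simpa [Nat.lt_min] using ⟨h1, h1len⟩)]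
            simp [List.getElem_take]
          rw [hseg2, ih (stop - (i + 2)) (by omega) (i + 2) rfl (by omega)]
          simp [isStringLoopA]
        · -- the backslash is the last interior character: both sides reject
          have : (l.take stop).drop (i + 1) = [] := by
            apply List.drop_eq_nil_of_le
            simp only [List.length_take]
            omega
          rw [this]
          have h2 : ¬ (i + 2 < stop) := by omega
          rw [isStringLoopB, if_neg h2]
          simp [isStringLoopA]; omega
      · by_cases hq : l[i] = '"'
        · simp [hq, isStringLoopA]
        · have hbs' : (l[i] == '\\') = false := by simp [hbs]
          have := ih (stop - (i + 1)) (by omega) (i + 1) rfl (by omega)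
          simp [hq, isStringLoopA, this, hbs']
    · have heq : i = stop := le_antisymm hi hge
      rw [isStringLoopB, if_neg (by omega)]
      have hnil : (l.take stop).drop i = [] := by
        apply List.drop_eq_nil_of_le
        simp only [List.length_take]
        omega
      simp [isStringLoopA, heq]

-- the slice x[1:-1] is the segment the scan walks over
lemma slice_interior (l : List Char) (h : 2 ≤ l.length) :
    PySem.List.slice l (some 1) (some (-1)) = (l.drop 1).take (l.length - 2) := by
  simp [PySem.List.slice]
  rw [show min 1 l.length = 1 from by omega,
      show l.length - 1 - 1 = l.length - 2 from by omega, List.drop_one]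

-- ===== VERDICT (by name: the statement is the Claim_ definition above) =====
theorem is_string_spec : Claim_equal_is_string := by
  intro x _
  unfold Spec_is_string is_string is_string_alt
  have hxl : x.length = x.toList.length := by simp
  by_cases hlen : x.toList.length < 2
  · simp [show x.length ≤ 1 from by omega]
  · have hlen2 : 2 ≤ x.toList.length := by omega
    have hseg := loopB_eq_loopA x.toList (x.toList.length - 1) (by omega)
      (x.toList.length - 2) 1 (by omega) (by omega)
    have hdt : ((x.toList).take (x.toList.length - 1)).drop 1
        = (x.toList.drop 1).take (x.toList.length - 2) := by
      rw [List.drop_take, show x.toList.length - 1 - 1 = x.toList.length - 2 from by omega]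
    rw [hdt, ← hxl] at hseg
    simp [slice_interior x.toList hlen2,
      show ¬ x.length ≤ 1 from by omega]
    simp only [← List.drop_one]
    rw [hseg]
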